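-- pv_equiv track=rewrite | github.com/Adnan525/challenges_v2 | hr_collections_counter/main.py | get_shoe_money
-- ===== SOURCE A (Python) =====
-- from collections import Counter
--
-- def get_shoe_money(x: int,
--                    sizes: list[int],
--                    n: int,
--                    prices: list[tuple[int, int]]) -> int:
--
--     stock = Counter(sizes)
--     total_money = 0
--
--     for shoe_size, price in prices:
--         if stock.get(shoe_size, 0) > 0:
--             total_money += price
--             stock[shoe_size] -= 1
--
--     return total_money
-- ===== SOURCE B (Python) =====
-- from collections import Counter
--
-- def get_shoe_money(x: int,
--                    sizes: list[int],
--                    n: int,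
--                    prices: list[tuple[int, int]]) -> int:
--     # Group the requested prices by shoe size (arrival order preserved),
--     # then for each size sell the first stock[size] requests.
--     groups = {}
--     for size, price in prices:
--         groups.setdefault(size, []).append(price)
--     stock = Counter(sizes)
--     return sum(sum(ps[:stock[s]]) for s, ps in groups.items())
-- ===== Notes on version B (the rewrite author's own statement) =====
-- stated objective: alternative
-- what changed: B replaces A's single decrementing-counter pass with a grouping pass (size -> ordered list of requested prices) followed by summing the first stock[size] prices of each group.
import Mathlib
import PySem

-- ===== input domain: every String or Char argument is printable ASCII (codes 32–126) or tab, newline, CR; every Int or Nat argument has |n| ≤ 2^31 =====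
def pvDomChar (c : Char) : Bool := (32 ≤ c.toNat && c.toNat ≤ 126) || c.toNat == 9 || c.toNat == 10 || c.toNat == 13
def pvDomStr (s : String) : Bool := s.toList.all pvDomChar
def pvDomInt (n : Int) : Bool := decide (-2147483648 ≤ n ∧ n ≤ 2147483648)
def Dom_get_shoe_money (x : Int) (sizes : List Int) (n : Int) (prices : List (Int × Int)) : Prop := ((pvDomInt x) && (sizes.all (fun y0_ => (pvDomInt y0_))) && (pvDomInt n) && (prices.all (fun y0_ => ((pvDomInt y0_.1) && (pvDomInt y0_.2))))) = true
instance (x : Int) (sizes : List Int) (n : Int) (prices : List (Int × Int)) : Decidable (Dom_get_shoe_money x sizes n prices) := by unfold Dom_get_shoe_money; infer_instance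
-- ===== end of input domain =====

-- B regroups A's single decrementing-counter pass into group-prices-by-size then
-- sum the first stock[size] prices per group (objective: alternative decomposition).

-- ===== PORT A =====
-- loop body of A: state = (stock, total_money)
def pvStepA (st : PySem.Dict Int Int × Int) (pr : Int × Int) : PySem.Dict Int Int × Int :=
  if st.1.getD pr.1 0 > 0 then (st.1.insert pr.1 (st.1.getD pr.1 0 - 1), st.2 + pr.2) else st

def get_shoe_money (x : Int) (sizes : List Int) (n : Int) (prices : List (Int × Int)) : Int :=
  (prices.foldl pvStepA (PySem.Dict.counter sizes, 0)).2

-- ===== PORT B =====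
def get_shoe_money_alt (x : Int) (sizes : List Int) (n : Int) (prices : List (Int × Int)) : Int :=
  let groups := prices.foldl (fun d pr => d.modify pr.1 [] (fun ps => ps ++ [pr.2])) PySem.Dict.empty
  let stock := PySem.Dict.counter sizes
  -- ps[:stock[s]] = take: exact, Counter values are ≥ 0
  groups.items.foldl (fun acc pr => acc + (pr.2.take (stock.getD pr.1 0).toNat).sum) 0

-- ===== PRECONDITION & SPEC =====
def Spec_get_shoe_money (x : Int) (sizes : List Int) (n : Int) (prices : List (Int × Int)) (out : Int) : Prop := out = get_shoe_money_alt x sizes n prices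
instance (x : Int) (sizes : List Int) (n : Int) (prices : List (Int × Int)) (out : Int) : Decidable (Spec_get_shoe_money x sizes n prices out) := by unfold Spec_get_shoe_money; infer_instance

-- ===== CLAIM (what is proved, stated in full; the proofs are below) =====
def Claim_equal_get_shoe_money : Prop := ∀ (x : Int) (sizes : List Int) (n : Int) (prices : List (Int × Int)), Dom_get_shoe_money x sizes n prices → Spec_get_shoe_money x sizes n prices (get_shoe_money x sizes n prices)

-- ===== LEMMAS AND PROOFS =====

-- prices requested for shoe size k, in order
def pvGrp (k : Int) (l : List (Int × Int)) : List Int :=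
  (l.filter (fun p => p.1 == k)).map (·.2)

-- canonical value: over the distinct sizes, sum of the first (f k) prices of each group
def pvCanon (l : List (Int × Int)) (f : Int → Int) : Int :=
  ((PySem.Set.ofList (l.map (·.1))).map (fun k => ((pvGrp k l).take (f k).toNat).sum)).sum

theorem pv_foldl_add_sum {α : Type} (l : List α) (g : α → Int) (a : Int) :
    l.foldl (fun acc x => acc + g x) a = a + (l.map g).sum := by
  induction l generalizing a with
  | nil => simp
  | cons h t ih => simp [List.foldl_cons, ih, add_assoc]

theorem pv_grp_append (k s p : Int) (l : List (Int × Int)) :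
    pvGrp k (l ++ [(s, p)]) = pvGrp k l ++ (if s = k then [p] else []) := by
  simp only [pvGrp, List.filter_append, List.map_append, List.filter_cons, List.filter_nil]
  by_cases h : s = k
  · simp [h]
  · simp [h]

theorem pv_take_append_singleton (n : Nat) (xs : List Int) (p : Int) :
    (xs ++ [p]).take n = xs.take n ++ (if xs.length < n then [p] else []) := by
  rw [List.take_append]
  congr 1
  rcases lt_or_ge xs.length n with h | h
  · rw [if_pos h]
    exact List.take_of_length_le (by simp; omega)
  · rw [if_neg (not_lt.mpr h), Nat.sub_eq_zero_of_le h, List.take_zero]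

-- stock invariant of A's loop
theorem pv_stock_inv (l : List (Int × Int)) (d : PySem.Dict Int Int) (t : Int)
    (hd : ∀ k, 0 ≤ d.getD k 0) (k : Int) :
    ((l.foldl pvStepA (d, t)).1).getD k 0 = max (d.getD k 0 - (pvGrp k l).length) 0 := by
  induction l using List.reverseRecOn generalizing k with
  | nil => simp [pvGrp, max_eq_left (hd k)]
  | append_singleton l a ih =>
    obtain ⟨s, p⟩ := a
    rw [List.foldl_append, List.foldl_cons, List.foldl_nil]
    simp only [pvStepA]
    by_cases hpos : ((l.foldl pvStepA (d, t)).1).getD s 0 > 0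
    · simp only [if_pos hpos, PySem.Dict.getD_insert]
      have hs := ih s
      by_cases hk : k = s
      · subst hk
        rw [if_pos rfl, hs, pv_grp_append]
        rw [hs] at hpos
        have h1 : 0 < d.getD k 0 - ((pvGrp k l).length : Int) :=
          (lt_max_iff.mp hpos).resolve_right (lt_irrefl 0)
        simp only [List.length_append]
        rw [max_eq_left (by omega), max_eq_left (by simp; omega)]
        simp
        omega
      · rw [if_neg hk, ih k, pv_grp_append]
        simp [Ne.symm hk]
    · simp only [if_neg hpos]
      have hs := ih s
      by_cases hk : k = s
      · subst hk
        rw [hs, pv_grp_append]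
        rw [hs] at hpos
        have h1 : d.getD k 0 - ((pvGrp k l).length : Int) ≤ 0 := by
          by_contra hc
          exact hpos (lt_max_iff.mpr (Or.inl (by omega)))
        simp only [List.length_append]
        rw [max_eq_right (by omega), max_eq_right (by simp; omega)]
      · rw [ih k, pv_grp_append]
        simp [Ne.symm hk]

-- replacing the value at one member of a Nodup list adds its delta to the sum
theorem pv_sum_update (K : List Int) (f : Int → Int) (s δ : Int)
    (hnd : K.Nodup) (hs : s ∈ K) :
    (K.map (fun k => f k + (if s = k then δ else 0))).sum = (K.map f).sum + δ := by
  induction K with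
  | nil => cases hs
  | cons h t ih =>
    rcases List.mem_cons.mp hs with rfl | hmem
    · have hnot : ∀ k ∈ t, ¬ (s = k) := by
        intro k hk he; exact (List.nodup_cons.mp hnd).1 (he ▸ hk)
      simp only [List.map_cons, List.sum_cons]
      have : (t.map (fun k => f k + (if s = k then δ else 0))).sum = (t.map f).sum := by
        congr 1
        exact List.map_congr_left (fun k hk => by simp [hnot k hk])
      rw [this]
      simp only [if_true]
      ring
    · have hne : ¬ (s = h) := fun he => (List.nodup_cons.mp hnd).1 (he ▸ hmem)
      simp only [List.map_cons, List.sum_cons, if_neg hne]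
      rw [ih (List.nodup_cons.mp hnd).2 hmem]; ring

-- main invariant: A's running total equals the canonical group-then-take value
theorem pv_loop_eq_canon (l : List (Int × Int)) (d : PySem.Dict Int Int) (t : Int)
    (hd : ∀ k, 0 ≤ d.getD k 0) :
    (l.foldl pvStepA (d, t)).2 = t + pvCanon l (fun k => d.getD k 0) := by
  induction l using List.reverseRecOn with
  | nil => simp [pvCanon, PySem.Set.ofList]
  | append_singleton l a ih =>
    obtain ⟨s, p⟩ := a
    rw [List.foldl_append, List.foldl_cons, List.foldl_nil]
    simp only [pvStepA]
    have hstock := pv_stock_inv l d t hd s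
    have hset : PySem.Set.ofList ((l ++ [(s, p)]).map (·.1))
        = PySem.Set.add (PySem.Set.ofList (l.map (·.1))) s := by
      rw [List.map_append]; exact PySem.Set.ofList_append_singleton _ _
    by_cases hpos : ((l.foldl pvStepA (d, t)).1).getD s 0 > 0
    · -- price taken: d s > |group s l|
      have hgt : (pvGrp s l).length < (d.getD s 0).toNat := by
        rw [hstock] at hpos; omega
      rw [if_pos hpos]
      simp only [ih]
      unfold pvCanon
      rw [hset]
      by_cases hmem : s ∈ PySem.Set.ofList (l.map (·.1))
      · rw [PySem.Set.add_of_mem hmem]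
        have : ∀ k ∈ PySem.Set.ofList (l.map (·.1)),
            ((pvGrp k (l ++ [(s, p)])).take (d.getD k 0).toNat).sum
            = ((pvGrp k l).take (d.getD k 0).toNat).sum + (if s = k then p else 0) := by
          intro k _
          rw [pv_grp_append]
          by_cases hk : s = k
          · subst hk
            rw [if_pos rfl, pv_take_append_singleton _ _ _, if_pos hgt]
            simp
          · simp [hk]
        rw [List.map_congr_left this,
          pv_sum_update _ _ s p (PySem.Set.nodup_ofList _) hmem]
        ring
      · rw [PySem.Set.add_of_not_mem hmem, List.map_append, List.sum_append]
        have hgrp0 : pvGrp s l = [] := by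
          simp only [pvGrp, List.map_eq_nil_iff, List.filter_eq_nil_iff]
          intro p hp hb
          exact hmem ((PySem.Set.mem_ofList _ _).mpr (List.mem_map.mpr ⟨p, hp, by simpa using hb⟩))
        have : ∀ k ∈ PySem.Set.ofList (l.map (·.1)),
            ((pvGrp k (l ++ [(s, p)])).take (d.getD k 0).toNat).sum
            = ((pvGrp k l).take (d.getD k 0).toNat).sum := by
          intro k hk
          rw [pv_grp_append]
          have : ¬ (s = k) := fun he => hmem (he ▸ hk)
          simp [this]
        rw [List.map_congr_left this]
        rw [hgrp0] at hgt
        simp only [List.length_nil] at hgt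
        simp only [List.map_cons, List.map_nil, List.sum_cons, List.sum_nil]
        rw [pv_grp_append, if_pos rfl, hgrp0]
        simp only [List.nil_append]
        rw [List.take_of_length_le (by simp only [List.length_cons, List.length_nil]; omega)]
        simp; ring
    · -- price not taken: d s ≤ |group s l|
      have hle : (d.getD s 0).toNat ≤ (pvGrp s l).length := by
        rw [hstock] at hpos
        have := hd s; omega
      rw [if_neg hpos]
      rw [ih]
      unfold pvCanon
      rw [hset]
      have hsame : ∀ k ∈ PySem.Set.add (PySem.Set.ofList (l.map (·.1))) s,
          ((pvGrp k (l ++ [(s, p)])).take (d.getD k 0).toNat).sum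
          = ((pvGrp k l).take (d.getD k 0).toNat).sum := by
        intro k _
        rw [pv_grp_append]
        by_cases hk : s = k
        · subst hk
          rw [if_pos rfl, pv_take_append_singleton _ _ _, if_neg (by omega)]
          simp
        · simp [hk]
      rw [List.map_congr_left hsame]
      by_cases hmem : s ∈ PySem.Set.ofList (l.map (·.1))
      · rw [PySem.Set.add_of_mem hmem]
      · rw [PySem.Set.add_of_not_mem hmem, List.map_append, List.sum_append]
        have hgrp0 : pvGrp s l = [] := by
          simp only [pvGrp, List.map_eq_nil_iff, List.filter_eq_nil_iff]
          intro p hp hb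
          exact hmem ((PySem.Set.mem_ofList _ _).mpr (List.mem_map.mpr ⟨p, hp, by simpa using hb⟩))
        rw [hgrp0] at hle
        simp only [List.length_nil, Nat.le_zero] at hle
        simp [hgrp0, hle]

-- B computes the canonical value with f = Counter(sizes)
theorem pv_alt_eq_canon (x : Int) (sizes : List Int) (n : Int) (prices : List (Int × Int)) :
    get_shoe_money_alt x sizes n prices
      = pvCanon prices (fun k => (sizes.count k : Int)) := by
  unfold get_shoe_money_alt
  simp only
  rw [pv_foldl_add_sum]
  have hnd : (prices.foldl (fun d pr => d.modify pr.1 [] (fun ps => ps ++ [pr.2]))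
      PySem.Dict.empty).keys.Nodup := by
    exact PySem.Dict.nodup_keys_foldl_modify_key prices (·.1) [] (fun _ pr ps => ps ++ [pr.2])
      PySem.Dict.empty (by simp [PySem.Dict.keys_empty])
  rw [PySem.Dict.items_eq_map_keys _ hnd []]
  have hkeys : (prices.foldl (fun d pr => d.modify pr.1 [] (fun ps => ps ++ [pr.2]))
      PySem.Dict.empty).keys = PySem.Set.ofList (prices.map (·.1)) := by
    rw [PySem.Dict.keys_foldl_modify_key prices (·.1) [] (fun _ pr ps => ps ++ [pr.2])
      PySem.Dict.empty]
    simp [PySem.Dict.keys_empty, PySem.Set.update_nil_left]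
  rw [hkeys, List.map_map]
  unfold pvCanon
  simp only [Int.zero_add]
  congr 1
  apply List.map_congr_left
  intro k _
  simp only [Function.comp]
  rw [PySem.Dict.getD_foldl_modify_append, PySem.Dict.getD_counter]
  simp [pvGrp, PySem.Dict.getD_empty]

-- ===== VERDICT (by name: the statement is the Claim_ definition above) =====
theorem get_shoe_money_spec : Claim_equal_get_shoe_money := by
  intro x sizes n prices _
  unfold Spec_get_shoe_money
  rw [pv_alt_eq_canon]
  unfold get_shoe_money
  rw [pv_loop_eq_canon prices (PySem.Dict.counter sizes) 0
    (fun k => by rw [PySem.Dict.getD_counter]; exact Int.natCast_nonneg _)]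
  simp only [Int.zero_add]
  congr 1
  funext k
  rw [PySem.Dict.getD_counter]
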